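-- pv_equiv track=rewrite | github.com/malijabbari/cst_project_generator | util/script_generator.py | to_inline
-- ===== SOURCE A (Python) =====
-- from typing import List
--
-- def to_inline(basic_script: str) -> str:
--     """
--     convert the given basic_script string content to a single inline command.
--     """
--     s = basic_script
--
--     # convert tabs to 4 spaces
--     s = s.replace('\t', '    ')
--
--     # split at newline (\n), double quote (") and single quotes (')
--     #   gives a triple list of strings
--     s___: List[List[List[str]]] = []
--     for idx1, line in enumerate(s.split('\n')):
--         s___.insert(idx1, [])
--         for idx2, split in enumerate(line.split('"')):
--             s___[idx1].insert(idx2, [])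
--             for idx3, elem in enumerate(split.split("'")):
--                 s___[idx1][idx2].insert(idx3, elem)
--
--     # wrap each element in double quotes
--     for idx1 in range(len(s___)):
--         for idx2 in range(len(s___[idx1])):
--             for idx3 in range(len(s___[idx1][idx2])):
--                 s___[idx1][idx2][idx3] = '"%s"' % s___[idx1][idx2][idx3]
--
--     # previously, the script was split at single quotes ('), recombine it
--     # with basic script type of char character: Chr(39)
--     s__: List[List[str]] = []
--     for idx1, double_list in enumerate(s___):
--         s__.insert(idx1, [])
--         for idx2, single_list in enumerate(double_list):
--             s__[idx1].insert(idx2, '+Chr(39)+'.join(single_list))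
--
--     # do the same for double quotes
--     s_: List[str] = []
--     for array in s__:
--         s_.append('+Chr(34)+'.join(array))
--
--     # to the same but for newlines
--     s = '+Chr(10)+'.join(s_)
--
--     # remove double plus
--     s = s.replace('++', '+')
--
--     # return the obtained inline script
--     return s
-- ===== SOURCE B (Python) =====
-- def to_inline(basic_script: str) -> str:
--     s = basic_script.replace('\t', '    ')
--     tok = {'\n': '"+Chr(10)+"', '"': '"+Chr(34)+"', "'": '"+Chr(39)+"'}
--     parts = ['"']
--     for c in s:
--         parts.append(tok.get(c, c))
--     parts.append('"')
--     return ''.join(parts).replace('++', '+')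
-- ===== Notes on version B (the rewrite author's own statement) =====
-- stated objective: idiomatic
-- what changed: Replaces the triple-nested split/insert/wrap/join pipeline by a single linear scan that maps each of \n, ", ' to its quoted Chr() token (simultaneous substitution), wrapping the whole result in double quotes.
import Mathlib
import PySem

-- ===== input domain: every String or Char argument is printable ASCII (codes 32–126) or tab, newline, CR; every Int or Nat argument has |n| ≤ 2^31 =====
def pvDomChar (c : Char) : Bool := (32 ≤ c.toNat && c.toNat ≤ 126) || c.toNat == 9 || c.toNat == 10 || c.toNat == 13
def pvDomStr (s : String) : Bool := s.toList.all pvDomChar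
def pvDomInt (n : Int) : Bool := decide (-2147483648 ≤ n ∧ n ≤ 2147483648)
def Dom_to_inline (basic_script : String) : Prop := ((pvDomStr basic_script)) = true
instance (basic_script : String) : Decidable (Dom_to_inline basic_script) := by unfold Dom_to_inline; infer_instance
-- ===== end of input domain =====

-- B replaces A's triple-nested split/wrap/join pipeline with one linear scan that
-- substitutes quoted Chr() tokens per character (idiomatic; same asymptotic cost).


-- ===== PORT A =====
-- Transliteration of A: the enumerate/insert and range/assignment loops build the
-- nested lists element by element in order, i.e. each level is the map over the split.
def to_inline (basic_script : String) : String :=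
  -- s = s.replace('\t', '    ')
  let s := PySem.Chars.replace basic_script.toList "\t".toList "    ".toList
  -- triple split at '\n', '"', "'"
  let s3 : List (List (List (List Char))) :=
    (PySem.Chars.splitOn s "\n".toList).map (fun line =>
      (PySem.Chars.splitOn line "\"".toList).map (fun split =>
        PySem.Chars.splitOn split "'".toList))
  -- wrap each element in double quotes: '"%s"' % elem
  let s3w := s3.map (fun d => d.map (fun l => l.map (fun e => "\"".toList ++ e ++ "\"".toList)))
  -- '+Chr(39)+'.join each innermost list
  let s2 := s3w.map (fun d => d.map (fun l => PySem.Chars.join "+Chr(39)+".toList l))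
  -- '+Chr(34)+'.join
  let s1 := s2.map (fun d => PySem.Chars.join "+Chr(34)+".toList d)
  -- '+Chr(10)+'.join
  let sj := PySem.Chars.join "+Chr(10)+".toList s1
  -- s.replace('++', '+')
  String.ofList (PySem.Chars.replace sj "++".toList "+".toList)

-- ===== PORT B =====
-- tok.get(c, c) of Source B
def pvTok (c : Char) : List Char :=
  if c = '\n' then "\"+Chr(10)+\"".toList
  else if c = '"' then "\"+Chr(34)+\"".toList
  else if c = '\'' then "\"+Chr(39)+\"".toList
  else [c]

def to_inline_alt (basic_script : String) : String :=
  let s := PySem.Chars.replace basic_script.toList "\t".toList "    ".toList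
  -- parts = ['"']; for c in s: parts.append(tok.get(c, c)); parts.append('"'); ''.join(parts)
  let core := "\"".toList ++ s.flatMap pvTok ++ "\"".toList
  String.ofList (PySem.Chars.replace core "++".toList "+".toList)

-- ===== PRECONDITION & SPEC =====
def Spec_to_inline (basic_script : String) (out : String) : Prop := out = to_inline_alt basic_script
instance (basic_script : String) (out : String) : Decidable (Spec_to_inline basic_script out) := by unfold Spec_to_inline; infer_instance

-- ===== CLAIM (what is proved, stated in full; the proofs are below) =====
def Claim_equal_to_inline : Prop := ∀ (basic_script : String), Dom_to_inline basic_script → Spec_to_inline basic_script (to_inline basic_script)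

-- ===== LEMMAS AND PROOFS =====
def mySplit (c : Char) (pre : List Char) : List Char → List (List Char)
  | [] => [pre]
  | a :: rest => if a = c then pre :: mySplit c [] rest else mySplit c (pre ++ [a]) rest

lemma go_eq_mySplit (c : Char) (fuel : Nat) (l cur : List Char) (acc : List (List Char))
    (h : l.length ≤ fuel) :
    PySem.Chars.splitOn.go [c] fuel l cur acc = acc.reverse ++ mySplit c cur.reverse l := by
  induction fuel generalizing l cur acc with
  | zero =>
    have : l = [] := by cases l with | nil => rfl | cons a r => simp at h
    subst this
    simp [PySem.Chars.splitOn.go, mySplit]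
  | succ fuel ih =>
    cases l with
    | nil => simp [PySem.Chars.splitOn.go, mySplit]
    | cons a rest =>
      simp only [List.length_cons] at h
      by_cases hac : a = c
      · subst hac
        rw [show PySem.Chars.splitOn.go [a] (fuel+1) (a::rest) cur acc
            = PySem.Chars.splitOn.go [a] fuel rest [] (cur.reverse :: acc) from by
          simp [PySem.Chars.splitOn.go, List.isPrefixOf]]
        rw [ih rest [] (cur.reverse :: acc) (by omega)]
        simp [mySplit]
      · rw [show PySem.Chars.splitOn.go [c] (fuel+1) (a::rest) cur acc
            = PySem.Chars.splitOn.go [c] fuel rest (a :: cur) acc from by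
          simp [PySem.Chars.splitOn.go, List.isPrefixOf, Ne.symm hac]]
        rw [ih rest (a :: cur) acc (by omega)]
        simp [mySplit, hac]

lemma mySplit_ne_nil (c : Char) (pre l : List Char) : mySplit c pre l ≠ [] := by
  induction l generalizing pre with
  | nil => simp [mySplit]
  | cons a rest ih =>
    simp only [mySplit]
    split_ifs <;> simp [ih]


lemma join_map_mySplit (c : Char) (sep : List Char) (g : Char → List Char)
    (f : List Char → List Char)
    (hf : ∀ x, f x = '"' :: (x.flatMap g ++ ['"'])) (l pre : List Char) :
    PySem.Chars.join sep (List.map f (mySplit c pre l)) =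
      '"' :: (pre.flatMap g ++
        l.flatMap (fun a => if a = c then '"' :: sep ++ ['"'] else g a) ++ ['"']) := by
  induction l generalizing pre with
  | nil => simp [mySplit, PySem.Chars.join, List.intercalate, hf]
  | cons a rest ih =>
    by_cases hac : a = c
    · subst hac
      rw [show mySplit a pre (a :: rest) = pre :: mySplit a [] rest from by simp [mySplit]]
      obtain ⟨y, t, hyt⟩ : ∃ y t, List.map f (mySplit a [] rest) = y :: t := by
        cases hms : mySplit a [] rest with
        | nil => exact absurd hms (mySplit_ne_nil a [] rest)
        | cons y t => exact ⟨f y, List.map f t, by simp⟩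
      rw [List.map_cons, hyt, PySem.Chars.join_cons_cons, ← hyt, ih []]
      simp [hf, List.flatMap_cons]
    · rw [show mySplit c pre (a :: rest) = mySplit c (pre ++ [a]) rest from by simp [mySplit, hac]]
      rw [ih (pre ++ [a])]
      simp [List.flatMap_cons, hac]

lemma splitOn_single (c : Char) (s : List Char) :
    PySem.Chars.splitOn s [c] = mySplit c [] s := by
  have := go_eq_mySplit c (s.length + 1) s [] [] (by omega)
  simpa [PySem.Chars.splitOn] using this

lemma split_join_level (c : Char) (sep : List Char) (g : Char → List Char)
    (f : List Char → List Char)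
    (hf : ∀ x, f x = '"' :: (x.flatMap g ++ ['"'])) (s : List Char) :
    PySem.Chars.join sep (List.map f (PySem.Chars.splitOn s [c])) =
      '"' :: (s.flatMap (fun a => if a = c then '"' :: sep ++ ['"'] else g a) ++ ['"']) := by
  rw [splitOn_single, join_map_mySplit c sep g f hf s []]
  simp


lemma core_eq (s : List Char) :
    PySem.Chars.join "+Chr(10)+".toList
      ((PySem.Chars.splitOn s "\n".toList).map (fun line =>
        PySem.Chars.join "+Chr(34)+".toList
          ((PySem.Chars.splitOn line "\"".toList).map (fun split =>
            PySem.Chars.join "+Chr(39)+".toList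
              ((PySem.Chars.splitOn split "'".toList).map
                (fun e => "\"".toList ++ e ++ "\"".toList)))))) =
      "\"".toList ++ s.flatMap pvTok ++ "\"".toList := by
  simp only [show "\n".toList = ['\n'] from rfl, show "\"".toList = ['"'] from rfl,
    show "'".toList = ['\''] from rfl]
  have h39 : ∀ x : List Char,
      PySem.Chars.join "+Chr(39)+".toList
        ((PySem.Chars.splitOn x ['\'']).map (fun e => ['"'] ++ e ++ ['"'])) =
      '"' :: (x.flatMap (fun a => if a = '\'' then '"' :: "+Chr(39)+".toList ++ ['"'] else [a]) ++ ['"']) :=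
    fun x => split_join_level '\'' _ (fun a => [a]) _ (by intro y; simp) x
  have h34 : ∀ x : List Char,
      PySem.Chars.join "+Chr(34)+".toList
        ((PySem.Chars.splitOn x ['"']).map (fun split =>
          PySem.Chars.join "+Chr(39)+".toList
            ((PySem.Chars.splitOn split ['\'']).map (fun e => ['"'] ++ e ++ ['"'])))) =
      '"' :: (x.flatMap (fun a => if a = '"' then '"' :: "+Chr(34)+".toList ++ ['"']
              else if a = '\'' then '"' :: "+Chr(39)+".toList ++ ['"'] else [a]) ++ ['"']) :=
    fun x => split_join_level '"' _ _ _ (fun y => h39 y) x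
  rw [split_join_level '\n' _ _ _ (fun y => h34 y) s]
  rfl

-- ===== VERDICT (by name: the statement is the Claim_ definition above) =====
theorem to_inline_spec : Claim_equal_to_inline := by
  intro s _
  show to_inline s = to_inline_alt s
  simp only [to_inline, to_inline_alt, List.map_map, Function.comp_def]
  rw [core_eq]
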